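-- pv_equiv track=rewrite | github.com/digitalcollegebrasil/student-attendance | delete_feriados_google.py | group_contiguous
-- ===== SOURCE A (Python) =====
-- from typing import Optional, List, Dict, Any, Iterator, Tuple
--
-- def group_contiguous(indices_0based: List[int]) -> List[Tuple[int, int]]:
--     """
--     Agrupa índices de linhas (0-based) contíguos em ranges [start, end_exclusive].
--     Ex.: [10,11,12,20,21] -> [(10,13),(20,22)]
--     """
--     if not indices_0based:
--         return []
--     idx = sorted(indices_0based)
--     ranges: List[Tuple[int, int]] = []
--     start = prev = idx[0]
--     for x in idx[1:]:
--         if x == prev + 1: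
--             prev = x
--             continue
--         ranges.append((start, prev + 1))
--         start = prev = x
--     ranges.append((start, prev + 1))
--     return ranges
-- ===== SOURCE B (Python) =====
-- from itertools import groupby
--
-- def group_contiguous(indices_0based):
--     """Key-transform then group: in the sorted list, v - position is constant
--     exactly on maximal runs of +1-incrementing values, so groupby on that key
--     yields the runs; emit (first, last + 1) per group."""
--     out = []
--     for _, grp in groupby(enumerate(sorted(indices_0based)),
--                           key=lambda p: p[1] - p[0]):
--         g = [v for _, v in grp]
--         out.append((g[0], g[-1] + 1))
--     return out
-- ===== Notes on version B (the rewrite author's own statement) =====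
-- stated objective: idiomatic
-- what changed: Replaced A's stateful start/prev loop with a key transformation plus grouping: enumerate the sorted list, key each pair by value - position (constant exactly on maximal +1-runs, and strictly decreasing across duplicates so they split as in A), group consecutive equal keys with itertools.groupby, and emit (first, last + 1) per group.
import Mathlib
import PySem

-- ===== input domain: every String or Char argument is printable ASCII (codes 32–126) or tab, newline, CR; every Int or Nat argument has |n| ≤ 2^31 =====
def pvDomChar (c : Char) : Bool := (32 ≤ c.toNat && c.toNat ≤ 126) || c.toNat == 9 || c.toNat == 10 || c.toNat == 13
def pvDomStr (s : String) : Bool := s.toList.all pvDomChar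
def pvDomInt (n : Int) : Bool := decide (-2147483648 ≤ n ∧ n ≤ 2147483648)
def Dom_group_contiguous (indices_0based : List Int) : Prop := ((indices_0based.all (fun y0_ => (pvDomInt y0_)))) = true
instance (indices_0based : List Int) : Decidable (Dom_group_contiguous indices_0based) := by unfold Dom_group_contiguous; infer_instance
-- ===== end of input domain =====

-- B replaces A's stateful start/prev loop by a key-transform-then-group strategy
-- (enumerate the sorted list, group consecutive pairs with equal value - position key,
-- emit (first, last + 1) per group): objective 'idiomatic', same cost.

-- ===== PORT A =====
-- loop body of A: state (ranges, start, prev)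
def gcStep (st : List (Int × Int) × Int × Int) (x : Int) : List (Int × Int) × Int × Int :=
  if x = st.2.2 + 1 then (st.1, st.2.1, x)
  else (st.1 ++ [(st.2.1, st.2.2 + 1)], x, x)

def group_contiguous (indices_0based : List Int) : List (Int × Int) :=
  if indices_0based = [] then []
  else
    match PySem.List.sorted indices_0based (fun x => x) false with
    | [] => []   -- unreachable: sorted of a nonempty list is nonempty
    | h :: t =>
      let r := t.foldl gcStep ([], h, h)
      r.1 ++ [(r.2.1, r.2.2 + 1)]

-- ===== PORT B =====
-- itertools.groupby with key p.2 - p.1 over the enumerated pairs: cur is the group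
-- being built (nonempty), prev the last pair seen (its key is the group's key)
def gcGroupBy (cur : List (Int × Int)) (prev : Int × Int) : List (Int × Int) → List (List (Int × Int))
  | [] => [cur]
  | q :: rest =>
    if q.2 - q.1 = prev.2 - prev.1 then gcGroupBy (cur ++ [q]) q rest
    else cur :: gcGroupBy [q] q rest

-- out.append((g[0], g[-1] + 1)) on the values of a group
def gcEmit (g : List (Int × Int)) : Int × Int :=
  ((g.headD (0, 0)).2, (g.getLastD (0, 0)).2 + 1)

def group_contiguous_alt (indices_0based : List Int) : List (Int × Int) :=
  match PySem.List.enumerate (PySem.List.sorted indices_0based (fun x => x) false) 0 with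
  | [] => []
  | p :: rest => (gcGroupBy [p] p rest).map gcEmit

-- ===== PRECONDITION & SPEC =====
def Spec_group_contiguous (indices_0based : List Int) (out : List (Int × Int)) : Prop := out = group_contiguous_alt indices_0based
instance (indices_0based : List Int) (out : List (Int × Int)) : Decidable (Spec_group_contiguous indices_0based out) := by unfold Spec_group_contiguous; infer_instance

-- ===== CLAIM (what is proved, stated in full; the proofs are below) =====
def Claim_equal_group_contiguous : Prop := ∀ (indices_0based : List Int), Dom_group_contiguous indices_0based → Spec_group_contiguous indices_0based (group_contiguous indices_0based)

-- ===== LEMMAS AND PROOFS =====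

-- common characterisation: the run decomposition of a list, given current start/prev
def gcRuns (s p : Int) : List Int → List (Int × Int)
  | [] => [(s, p + 1)]
  | x :: xs => if x = p + 1 then gcRuns s x xs else (s, p + 1) :: gcRuns x x xs

theorem gcRuns_foldl (t : List Int) : ∀ (acc : List (Int × Int)) (s p : Int),
    (t.foldl gcStep (acc, s, p)).1 ++ [((t.foldl gcStep (acc, s, p)).2.1, (t.foldl gcStep (acc, s, p)).2.2 + 1)]
      = acc ++ gcRuns s p t := by
  induction t with
  | nil => intro acc s p; simp [gcRuns]
  | cons x xs ih =>
    intro acc s p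
    simp only [List.foldl_cons, gcStep, gcRuns]
    by_cases hx : x = p + 1
    · simp [hx, ih]
    · simp [hx, ih, List.append_assoc]

theorem gc_headD_append (cur : List (Int × Int)) (q d : Int × Int) (h : cur ≠ []) :
    (cur ++ [q]).headD d = cur.headD d := by
  cases cur with
  | nil => exact absurd rfl h
  | cons a l => simp

theorem gcGroupBy_runs (t : List Int) : ∀ (i f p : Int) (cur : List (Int × Int)),
    cur ≠ [] → (cur.headD (0, 0)).2 = f → (cur.getLastD (0, 0)).2 = p →
    (gcGroupBy cur (i, p) (PySem.List.enumerate t (i + 1))).map gcEmit = gcRuns f p t := by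
  induction t with
  | nil =>
    intro i f p cur hne hh hl
    simp only [PySem.List.enumerate_nil, gcGroupBy, gcRuns, gcEmit, List.map_cons, List.map_nil]
    rw [hh, hl]
  | cons x xs ih =>
    intro i f p cur hne hh hl
    rw [PySem.List.enumerate_cons, gcGroupBy, gcRuns]
    by_cases hx : x = p + 1
    · rw [if_pos (by omega : x - (i + 1) = p - i), if_pos hx]
      exact ih (i + 1) f x (cur ++ [(i + 1, x)]) (by simp)
        (by rw [gc_headD_append _ _ _ hne]; exact hh)
        (by simp)
    · rw [if_neg (by omega : ¬ x - (i + 1) = p - i), if_neg hx, List.map_cons]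
      congr 1
      · simp only [gcEmit]; rw [hh, hl]
      · exact ih (i + 1) x x [(i + 1, x)] (by simp) (by simp) (by simp)

-- ===== VERDICT (by name: the statement is the Claim_ definition above) =====
theorem group_contiguous_spec : Claim_equal_group_contiguous := by
  intro l _
  unfold Spec_group_contiguous group_contiguous group_contiguous_alt
  by_cases hl : l = []
  · subst hl; simp [PySem.List.sorted, PySem.List.enumerate_nil]
  · rw [if_neg hl]
    have hlen : (PySem.List.sorted l (fun x => x) false).length = l.length :=
      PySem.List.length_sorted ..
    cases hidx : PySem.List.sorted l (fun x => x) false with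
    | nil =>
      exfalso; apply hl
      rw [hidx] at hlen; exact List.eq_nil_of_length_eq_zero hlen.symm
    | cons h t =>
      rw [PySem.List.enumerate_cons]
      show (t.foldl gcStep ([], h, h)).1 ++ [((t.foldl gcStep ([], h, h)).2.1, (t.foldl gcStep ([], h, h)).2.2 + 1)]
          = (gcGroupBy [(0, h)] (0, h) (PySem.List.enumerate t (0 + 1))).map gcEmit
      rw [gcGroupBy_runs t 0 h h [(0, h)] (by simp) (by simp) (by simp)]
      simpa using gcRuns_foldl t [] h h
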